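-- pv_equiv track=rewrite | github.com/Luckydog666liguan/DouZero-main | douzero/env/hu_pattern_detector.py | _is_five_three_same_color
-- ===== SOURCE A (Python) =====
-- def _is_same_color(cards):
--     """判断所有牌是否同色(红色或黑色)"""
--     suits = [card[1] for card in cards]
--     return all(suit % 2 == suits[0] % 2 for suit in suits)
--
-- def _is_five_three_same_color(cards):
--     """判断是否是5+3同色的组合"""
--     if not _is_same_color(cards):
--         return False
--
--     point_counts = {}
--     for card in cards:
--         point_counts[card[0]] = point_counts.get(card[0], 0) + 1
--
--     counts = sorted(point_counts.values())
--     return len(counts) == 2 and counts == [3, 5]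
-- ===== SOURCE B (Python) =====
-- def _run_lengths(sorted_points):
--     if not sorted_points:
--         return []
--     lengths = []
--     run = 1
--     prev = sorted_points[0]
--     for p in sorted_points[1:]:
--         if p == prev:
--             run += 1
--         else:
--             lengths.append(run)
--             prev = p
--             run = 1
--     lengths.append(run)
--     return lengths
--
--
-- def _is_five_three_same_color(cards):
--     """判断是否是5+3同色的组合"""
--     if len({card[1] % 2 for card in cards}) > 1:
--         return False
--     points = sorted(card[0] for card in cards)
--     return sorted(_run_lengths(points)) == [3, 5]
-- ===== Notes on version B (the rewrite author's own statement) =====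
-- stated objective: alternative
-- what changed: Replaces the hash-tally (dict of point counts whose values are sorted) by a sort-then-scan: a suit-parity set test, then the points are sorted once and a single scan collects the run lengths of equal points, which are compared to [3, 5].
import Mathlib
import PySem

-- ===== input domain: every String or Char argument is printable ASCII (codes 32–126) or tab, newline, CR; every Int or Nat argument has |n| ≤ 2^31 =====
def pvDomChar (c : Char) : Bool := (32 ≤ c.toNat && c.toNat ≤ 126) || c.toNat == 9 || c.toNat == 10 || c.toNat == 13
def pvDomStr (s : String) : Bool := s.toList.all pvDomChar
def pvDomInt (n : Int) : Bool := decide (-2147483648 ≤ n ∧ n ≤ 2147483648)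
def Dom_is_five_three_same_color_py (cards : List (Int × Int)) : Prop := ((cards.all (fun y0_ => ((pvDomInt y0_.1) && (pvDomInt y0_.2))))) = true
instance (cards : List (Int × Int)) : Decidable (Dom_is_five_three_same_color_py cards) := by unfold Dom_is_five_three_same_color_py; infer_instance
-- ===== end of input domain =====

-- B replaces A's dict tally of point counts by a sort-then-scan over the points (alternative decomposition, similar cost).

-- ===== PORT A =====
-- _is_same_color: suits = [card[1] for card in cards]; all(suit % 2 == suits[0] % 2 ...)
-- (all() over an empty generator is True, so suits[0] is never evaluated on []; headD 0 is unused then)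
def is_same_color_py (cards : List (Int × Int)) : Bool :=
  let suits := cards.map (fun c => c.2)
  suits.all (fun s => PySem.Int.mod s 2 == PySem.Int.mod (suits.headD 0) 2)

def is_five_three_same_color_py (cards : List (Int × Int)) : Bool :=
  if !(is_same_color_py cards) then false
  else
    let point_counts :=
      cards.foldl (fun d c => d.insert c.1 (d.getD c.1 0 + 1)) (PySem.Dict.empty : PySem.Dict Int Int)
    let counts := PySem.List.sorted point_counts.values (fun x => x) false
    decide (counts.length = 2) && (counts == [3, 5])

-- ===== PORT B =====
-- _run_lengths: the loop over sorted_points[1:] carrying (lengths, prev, run); here as the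
-- same-state structural recursion (lengths is the emitted prefix).
def run_lengths_aux : List Int → Int → Int → List Int
  | [], _, run => [run]
  | p :: rest, prev, run =>
    if p == prev then run_lengths_aux rest prev (run + 1)
    else run :: run_lengths_aux rest p 1

def run_lengths (sorted_points : List Int) : List Int :=
  match sorted_points with
  | [] => []
  | p :: rest => run_lengths_aux rest p 1

def is_five_three_same_color_py_alt (cards : List (Int × Int)) : Bool :=
  if 1 < (PySem.Set.ofList (cards.map (fun c => PySem.Int.mod c.2 2))).length then false
  else
    let points := PySem.List.sorted (cards.map (fun c => c.1)) (fun x => x) false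
    PySem.List.sorted (run_lengths points) (fun x => x) false == [3, 5]

-- ===== PRECONDITION & SPEC =====
def Spec_is_five_three_same_color_py (cards : List (Int × Int)) (out : Bool) : Prop := out = is_five_three_same_color_py_alt cards
instance (cards : List (Int × Int)) (out : Bool) : Decidable (Spec_is_five_three_same_color_py cards out) := by unfold Spec_is_five_three_same_color_py; infer_instance

-- ===== CLAIM (what is proved, stated in full; the proofs are below) =====
def Claim_equal_is_five_three_same_color_py : Prop := ∀ (cards : List (Int × Int)), Dom_is_five_three_same_color_py cards → Spec_is_five_three_same_color_py cards (is_five_three_same_color_py cards)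

-- ===== LEMMAS AND PROOFS =====

-- at most one distinct element ↔ all pairs equal
theorem setLen_le_one_iff (l : List Int) :
    (PySem.Set.ofList l).length ≤ 1 ↔ ∀ a ∈ l, ∀ b ∈ l, a = b := by
  have hmem : ∀ x, x ∈ PySem.Set.ofList l ↔ x ∈ l := fun x => PySem.Set.mem_ofList l x
  have hnd : (PySem.Set.ofList l).Nodup := PySem.Set.nodup_ofList l
  rcases hs : PySem.Set.ofList l with _ | ⟨x, _ | ⟨y, t⟩⟩ <;> rw [hs] at hmem hnd
  · constructor
    · intro _ a ha
      exact absurd ((hmem a).mpr ha) (by simp)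
    · intro _; simp
  · constructor
    · intro _ a ha b hb
      have h1 := (hmem a).mpr ha
      have h2 := (hmem b).mpr hb
      simp only [List.mem_singleton] at h1 h2
      rw [h1, h2]
    · intro _; simp
  · constructor
    · intro h; simp at h
    · intro h
      have hx : x ∈ l := (hmem x).mp (by simp)
      have hy : y ∈ l := (hmem y).mp (by simp)
      have : x = y := h x hx y hy
      simp [this] at hnd
  
-- A's color check equals B's parity-set test
theorem color_eq (cards : List (Int × Int)) :
    is_same_color_py cards =
      decide ((PySem.Set.ofList (cards.map (fun c => PySem.Int.mod c.2 2))).length ≤ 1) := by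
  unfold is_same_color_py
  rcases cards with _ | ⟨c, cs⟩
  · decide
  · simp only [List.map_cons, List.headD_cons]
    rw [Bool.eq_iff_iff, List.all_eq_true, decide_eq_true_iff,
      setLen_le_one_iff]
    constructor
    · intro h a ha b hb
      simp only [List.mem_cons, List.mem_map] at ha hb
      have key : ∀ x ∈ (c :: cs).map (fun c => PySem.Int.mod c.2 2),
          x = PySem.Int.mod c.2 2 := by
        intro x hx
        simp only [List.mem_map] at hx
        obtain ⟨d, hd, rfl⟩ := hx
        have := h d.2 (List.mem_map.mpr ⟨d, hd, rfl⟩)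
        exact eq_of_beq this
      have ha' := key a (by simpa using ha)
      have hb' := key b (by simpa using hb)
      rw [ha', hb']
    · intro h s hs
      simp only [List.mem_cons, List.mem_map] at hs
      have hm : PySem.Int.mod s 2 ∈
          PySem.Int.mod c.2 2 :: List.map (fun c => PySem.Int.mod c.2 2) cs := by
        rcases hs with rfl | ⟨d, hd, rfl⟩
        · exact List.mem_cons_self
        · exact List.mem_cons_of_mem _ (List.mem_map.mpr ⟨d, hd, rfl⟩)
      have := h (PySem.Int.mod s 2) hm (PySem.Int.mod c.2 2) List.mem_cons_self
      simpa using this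

-- filtering commutes with ofList (dedup keeps first occurrences)
theorem filter_ofList (l : List Int) (p : Int → Bool) :
    (PySem.Set.ofList l).filter p = PySem.Set.ofList (l.filter p) := by
  induction l with
  | nil => rfl
  | cons a t ih =>
    by_cases hp : p a = true
    · simp [PySem.Set.ofList_cons, PySem.Set.discard, hp, List.filter_filter, ← ih, Bool.and_comm]
    · simp only [PySem.Set.ofList_cons, PySem.Set.discard, List.filter_cons, hp, Bool.false_eq_true,
        if_false, List.filter_filter, ← ih]
      apply List.filter_congr
      intro x hx
      by_cases hxa : x = a
      · subst hxa
        simp [Bool.eq_false_iff.mpr hp]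
      · simp [hxa]

-- discard commutes with ofList as a filter
theorem discard_ofList (l : List Int) (a : Int) :
    PySem.Set.discard (PySem.Set.ofList l) a
      = PySem.Set.ofList (l.filter (fun x => !(x == a))) := by
  have : PySem.Set.discard (PySem.Set.ofList l) a
      = (PySem.Set.ofList l).filter (fun x => !(x == a)) := rfl
  rw [this, filter_ofList]

-- run_lengths of a sorted list = counts over its distinct elements in order
theorem mem_ofList_filter {l : List Int} {f : Int → Bool} {x : Int}
    (hx : x ∈ PySem.Set.ofList (l.filter f)) : f x = true := by
  have := PySem.Set.mem_ofList (l.filter f) x |>.mp hx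
  exact (List.mem_filter.mp this).2

theorem run_lengths_aux_eq (rest : List Int) (p : Int) (n : Int)
    (h : (p :: rest).Pairwise (· ≤ ·)) :
    run_lengths_aux rest p n
      = (n + rest.count p) ::
        (PySem.Set.ofList (rest.filter (fun x => !(x == p)))).map
          (fun k => (rest.count k : Int)) := by
  induction rest generalizing p n with
  | nil => simp [run_lengths_aux]
  | cons q rest' ih =>
    rcases List.pairwise_cons.mp h with ⟨hple, htail⟩
    by_cases hqp : q = p
    · subst hqp
      have h' : (q :: rest').Pairwise (· ≤ ·) := htail
      rw [show run_lengths_aux (q :: rest') q n = run_lengths_aux rest' q (n + 1) from by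
        simp [run_lengths_aux]]
      rw [ih q (n + 1) h']
      congr 1
      · simp [List.count_cons]; ring
      · rw [show (q :: rest').filter (fun x => !(x == q)) = rest'.filter (fun x => !(x == q)) from by
          simp]
        apply List.map_congr_left
        intro k hk
        have hkq : (!(k == q)) = true := mem_ofList_filter hk
        simp only [Bool.not_eq_eq_eq_not, Bool.not_true, beq_eq_false_iff_ne, ne_eq] at hkq
        simp [List.count_cons, hkq, Ne.symm hkq]
    · have hpq : p ≤ q := hple q List.mem_cons_self
      have hlt : p < q := lt_of_le_of_ne hpq (fun e => hqp e.symm)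
      rcases List.pairwise_cons.mp htail with ⟨hqle, _⟩
      have hrest'np : ∀ x ∈ rest', x ≠ p := by
        intro x hx e
        exact absurd (lt_of_lt_of_le hlt (hqle x hx)) (by rw [e]; exact lt_irrefl p)
      rw [show run_lengths_aux (q :: rest') p n = n :: run_lengths_aux rest' q 1 from by
        simp [run_lengths_aux, hqp]]
      rw [ih q 1 htail]
      have hcount0 : (q :: rest').count p = 0 := by
        simp only [List.count_eq_zero]
        intro hp
        rcases List.mem_cons.mp hp with e | hp'
        · exact hqp e.symm
        · exact hrest'np p hp' rfl
      have hfilter : (q :: rest').filter (fun x => !(x == p)) = q :: rest' := by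
        apply List.filter_eq_self.mpr
        intro x hx
        rcases List.mem_cons.mp hx with rfl | hx'
        · simp [hqp]
        · simp [hrest'np x hx']
      rw [hcount0, hfilter]
      have hof : PySem.Set.ofList (q :: rest')
          = q :: PySem.Set.ofList (rest'.filter (fun x => !(x == q))) := by
        rw [PySem.Set.ofList_cons, discard_ofList]
      rw [hof]
      simp only [List.map_cons]
      congr 1
      · push_cast; ring
      · congr 1
        · simp [List.count_cons]
          omega
        · apply List.map_congr_left
          intro k hk
          have hkq : (!(k == q)) = true := mem_ofList_filter hk
          simp only [Bool.not_eq_eq_eq_not, Bool.not_true, beq_eq_false_iff_ne, ne_eq] at hkq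
          simp [List.count_cons, hkq, Ne.symm hkq]

theorem run_lengths_eq (l : List Int) (h : l.Pairwise (· ≤ ·)) :
    run_lengths l = (PySem.Set.ofList l).map (fun k => (l.count k : Int)) := by
  rcases l with _ | ⟨p, rest⟩
  · rfl
  · rw [show run_lengths (p :: rest) = run_lengths_aux rest p 1 from rfl]
    rw [run_lengths_aux_eq rest p 1 h]
    rw [PySem.Set.ofList_cons, discard_ofList]
    simp only [List.map_cons]
    congr 1
    · simp [List.count_cons]; ring
    · apply List.map_congr_left
      intro k hk
      have hkq : (!(k == p)) = true := mem_ofList_filter hk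
      simp only [Bool.not_eq_eq_eq_not, Bool.not_true, beq_eq_false_iff_ne, ne_eq] at hkq
      simp [List.count_cons, hkq, Ne.symm hkq]

-- the two tallies agree: sorted dict-values = sorted run-lengths of the sorted points
theorem counts_eq (cards : List (Int × Int)) :
    (decide ((PySem.List.sorted (cards.foldl (fun d c => d.insert c.1 (d.getD c.1 0 + 1)) (PySem.Dict.empty : PySem.Dict Int Int)).values (fun x => x) false).length = 2) &&
      ((PySem.List.sorted (cards.foldl (fun d c => d.insert c.1 (d.getD c.1 0 + 1)) (PySem.Dict.empty : PySem.Dict Int Int)).values (fun x => x) false) == [3, 5]))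
    = ((PySem.List.sorted (run_lengths (PySem.List.sorted (cards.map (fun c => c.1)) (fun x => x) false)) (fun x => x) false) == [3, 5]) := by
  have hfold : cards.foldl (fun d c => d.insert c.1 (d.getD c.1 0 + 1)) (PySem.Dict.empty : PySem.Dict Int Int)
      = PySem.Dict.counter (cards.map (fun c => c.1)) := by
    rw [← PySem.Dict.foldl_insert_getD_add_one_eq_counter, List.foldl_map]
  have hvalues : (PySem.Dict.counter (cards.map (fun c => c.1))).values
      = (PySem.Set.ofList (cards.map (fun c => c.1))).map
          (fun k => ((cards.map (fun c => c.1)).count k : Int)) := by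
    simp only [PySem.Dict.values, PySem.Dict.items_counter, List.map_map]
    rfl
  have hsp : (PySem.List.sorted (cards.map (fun c => c.1)) (fun x => x) false).Pairwise (· ≤ ·) := by
    have := PySem.List.sorted_pairwise (xs := cards.map (fun c => c.1)) (key := fun x => x)
    exact this
  have hspperm : (PySem.List.sorted (cards.map (fun c => c.1)) (fun x => x) false).Perm
      (cards.map (fun c => c.1)) := PySem.List.sorted_perm _ _ _
  have hrl : run_lengths (PySem.List.sorted (cards.map (fun c => c.1)) (fun x => x) false)
      = (PySem.Set.ofList (PySem.List.sorted (cards.map (fun c => c.1)) (fun x => x) false)).map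
          (fun k => ((cards.map (fun c => c.1)).count k : Int)) := by
    rw [run_lengths_eq _ hsp]
    apply List.map_congr_left
    intro k _
    rw [hspperm.count_eq]
  have hofperm : (PySem.Set.ofList (PySem.List.sorted (cards.map (fun c => c.1)) (fun x => x) false)).Perm
      (PySem.Set.ofList (cards.map (fun c => c.1))) := by
    rw [List.perm_ext_iff_of_nodup (PySem.Set.nodup_ofList _) (PySem.Set.nodup_ofList _)]
    intro x
    rw [PySem.Set.mem_ofList, PySem.Set.mem_ofList, hspperm.mem_iff]
  have hperm : (run_lengths (PySem.List.sorted (cards.map (fun c => c.1)) (fun x => x) false)).Perm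
      ((cards.foldl (fun d c => d.insert c.1 (d.getD c.1 0 + 1)) (PySem.Dict.empty : PySem.Dict Int Int)).values) := by
    rw [hfold, hvalues, hrl]
    exact hofperm.map _
  have hsorted : (PySem.List.sorted (cards.foldl (fun d c => d.insert c.1 (d.getD c.1 0 + 1)) (PySem.Dict.empty : PySem.Dict Int Int)).values (fun x => x) false)
      = (PySem.List.sorted (run_lengths (PySem.List.sorted (cards.map (fun c => c.1)) (fun x => x) false)) (fun x => x) false) := by
    exact (PySem.List.sorted_id_eq_sorted_id_iff_perm _ _).mpr hperm.symm
  rw [hsorted]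
  by_cases h35 : (PySem.List.sorted (run_lengths (PySem.List.sorted (cards.map (fun c => c.1)) (fun x => x) false)) (fun x => x) false) = [3, 5]
  · simp [h35]
  · simp [h35]

-- ===== VERDICT (by name: the statement is the Claim_ definition above) =====
theorem is_five_three_same_color_py_spec : Claim_equal_is_five_three_same_color_py := by
  intro cards _
  unfold Spec_is_five_three_same_color_py
  unfold is_five_three_same_color_py is_five_three_same_color_py_alt
  rw [color_eq]
  by_cases hc : (PySem.Set.ofList (cards.map (fun c => PySem.Int.mod c.2 2))).length ≤ 1
  · rw [if_neg (show ¬ ((!decide ((PySem.Set.ofList (cards.map (fun c => PySem.Int.mod c.2 2))).length ≤ 1)) = true) from by rw [decide_eq_true hc]; decide),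
        if_neg (show ¬ ((1 < (PySem.Set.ofList (cards.map (fun c => PySem.Int.mod c.2 2))).length)) from by omega)]
    exact counts_eq cards
  · rw [if_pos (show ((!decide ((PySem.Set.ofList (cards.map (fun c => PySem.Int.mod c.2 2))).length ≤ 1)) = true) from by rw [decide_eq_false hc]; decide),
        if_pos (show ((1 < (PySem.Set.ofList (cards.map (fun c => PySem.Int.mod c.2 2))).length)) from by omega)]
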